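-- pv_equiv track=rewrite | github.com/Antoineview/ABR | TD1/matrix-correct.py | build_symetric
-- ===== SOURCE A (Python) =====
-- def build_symetric(M):
--     (lig,col) = (len(M),len(M[0]))
--     R = []
--     for _ in range(2*lig):
--         L = []
--         for _ in range(col):
--             L.append(0)
--         R.append(L)
--     for i in range(lig):
--         for j in range(col):
--             R[i][j] = M[i][j]
--             R[2*lig-i-1][j] = M[i][j]
--     return R
-- ===== SOURCE B (Python) =====
-- def build_symetric(M):
--     col = len(M[0])
--     top = [row[:col] for row in M]
--     bottom = [row[:col] for row in reversed(M)]
--     return top + bottom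
-- ===== Notes on version B (the rewrite author's own statement) =====
-- stated objective: simpler
-- what changed: Replaces A's zero pre-allocation of a 2n-row matrix followed by a mirror-index fill loop with a direct build: slice-copy each row top-down and again bottom-up, then concatenate.
import Mathlib
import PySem

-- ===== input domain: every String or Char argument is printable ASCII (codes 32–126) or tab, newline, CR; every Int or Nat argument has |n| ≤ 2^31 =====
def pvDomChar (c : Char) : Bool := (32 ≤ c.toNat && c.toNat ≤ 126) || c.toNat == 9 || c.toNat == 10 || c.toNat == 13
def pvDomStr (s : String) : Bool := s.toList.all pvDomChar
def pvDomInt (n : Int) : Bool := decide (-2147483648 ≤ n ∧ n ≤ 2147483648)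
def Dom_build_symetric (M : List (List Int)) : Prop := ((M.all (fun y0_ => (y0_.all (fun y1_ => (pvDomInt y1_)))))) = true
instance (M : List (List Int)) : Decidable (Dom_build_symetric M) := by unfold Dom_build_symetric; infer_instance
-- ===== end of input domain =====

-- B replaces A's zero pre-allocation + mirror-index fill with a direct "copy rows down, then up, concatenate" build (simpler decomposition, same cost).


-- ===== PORT A =====
def build_symetric (M : List (List Int)) : List (List Int) :=
  let lig : Int := M.length
  let col : Int := (PySem.List.pyGetD M 0 []).length
  let R : List (List Int) :=
    (PySem.List.pyRange 0 (2*lig) 1).foldl (fun R _ =>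
      R ++ [(PySem.List.pyRange 0 col 1).foldl (fun L _ => L ++ [(0:Int)]) []]) []
  (PySem.List.pyRange 0 lig 1).foldl (fun R i =>
    (PySem.List.pyRange 0 col 1).foldl (fun R j =>
      let R1 := PySem.List.pySetD R i
        (PySem.List.pySetD (PySem.List.pyGetD R i []) j
          (PySem.List.pyGetD (PySem.List.pyGetD M i []) j 0))
      PySem.List.pySetD R1 (2*lig - i - 1)
        (PySem.List.pySetD (PySem.List.pyGetD R1 (2*lig - i - 1) []) j
          (PySem.List.pyGetD (PySem.List.pyGetD M i []) j 0))) R) R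

-- ===== PORT B =====
def build_symetric_alt (M : List (List Int)) : List (List Int) :=
  let col : Int := (PySem.List.pyGetD M 0 []).length
  let top := M.map (fun row => PySem.List.slice row none (some col))
  let bottom := M.reverse.map (fun row => PySem.List.slice row none (some col))
  top ++ bottom

-- ===== PRECONDITION & SPEC =====
-- Pre_ excludes exactly the inputs where A raises IndexError: the empty matrix (M[0]),
-- and matrices with a row shorter than the first row (M[i][j] out of range).
def Pre_build_symetric (M : List (List Int)) : Prop :=
  M ≠ [] ∧ ∀ row ∈ M, (M.headD []).length ≤ row.length
instance (M : List (List Int)) : Decidable (Pre_build_symetric M) := by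
  unfold Pre_build_symetric; infer_instance

def pvWitness_build_symetric : List (List Int) := [[1, 2], [3, 4], [5, 6]]

def Spec_build_symetric (M : List (List Int)) (out : List (List Int)) : Prop := out = build_symetric_alt M
instance (M : List (List Int)) (out : List (List Int)) : Decidable (Spec_build_symetric M out) := by unfold Spec_build_symetric; infer_instance

-- ===== CLAIM (what is proved, stated in full; the proofs are below) =====
def Claim_equal_build_symetric : Prop := ∀ (M : List (List Int)), Dom_build_symetric M → Pre_build_symetric M → Spec_build_symetric M (build_symetric M)

-- ===== LEMMAS AND PROOFS =====


lemma fill_row (r : List Int) (c : Nat) (hc : c ≤ r.length) :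
    ∀ (a : Nat) (L : List Int), a ≤ c → c ≤ L.length →
    (PySem.List.pyRange (a:Int) (c:Int) 1).foldl
      (fun L j => PySem.List.pySetD L j (PySem.List.pyGetD r j 0)) L =
    L.take a ++ (r.take c).drop a ++ L.drop c := by
  suffices H : ∀ (d a : Nat) (L : List Int), d = c - a → a ≤ c → c ≤ L.length →
      (PySem.List.pyRange (a:Int) (c:Int) 1).foldl
        (fun L j => PySem.List.pySetD L j (PySem.List.pyGetD r j 0)) L =
      L.take a ++ (r.take c).drop a ++ L.drop c by
    intro a L ha hL; exact H (c - a) a L rfl ha hL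
  intro d
  induction d with
  | zero =>
    intro a L hd ha hL
    have hac : a = c := by omega
    subst hac
    rw [PySem.List.pyRange_one_eq_nil (le_refl _)]
    have h1 : (r.take a).drop a = [] := by
      apply List.drop_eq_nil_of_le; simp
    simp [h1, List.take_append_drop]
  | succ d ih =>
    intro a L hd ha hL
    have hac : a < c := by omega
    have hlen : a < L.length := by omega
    have hra : a < r.length := by omega
    rw [PySem.List.pyRange_one_cons (by exact_mod_cast hac)]
    simp only [List.foldl_cons]
    rw [show ((a:Int) + 1) = (((a+1 : Nat)) : Int) by push_cast; ring]
    rw [PySem.List.pySetD_natCast, PySem.List.pyGetD_natCast]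
    rw [ih (a+1) (L.set a (r.getD a 0)) (by omega) (by omega) (by simpa using hL)]
    have hv : r.getD a 0 = r[a] := List.getD_eq_getElem r 0 hra
    rw [hv, List.set_eq_take_cons_drop _ hlen]
    have htake : (L.take a ++ r[a] :: L.drop (a+1)).take (a+1) = L.take a ++ [r[a]] := by
      rw [List.take_append]
      simp [List.length_take, Nat.min_eq_left (le_of_lt hlen)]
    have hdrop : (L.take a ++ r[a] :: L.drop (a+1)).drop c = L.drop c := by
      rw [List.drop_append]
      have h2 : ((L.take a).length : Nat) = a := by simp [Nat.min_eq_left (le_of_lt hlen)]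
      rw [h2]
      have h3 : (L.take a).drop c = [] := by
        apply List.drop_eq_nil_of_le; simp; omega
      rw [h3, show c - a = (c - a - 1) + 1 by omega]
      simp only [List.drop_succ_cons, List.drop_drop, List.nil_append]
      congr 1; omega
    rw [htake, hdrop]
    have hmid : (r.take c).drop a = r[a] :: (r.take c).drop (a+1) := by
      have h1 : a < (r.take c).length := by simp [List.length_take]; omega
      rw [List.drop_eq_getElem_cons h1]
      congr 1
      simp [List.getElem_take]
    rw [hmid]
    simp

lemma fill_zero (r : List Int) (c : Nat) (hc : c ≤ r.length) (L : List Int) (hL : c ≤ L.length) :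
    (PySem.List.pyRange 0 (c:Int) 1).foldl
      (fun L j => PySem.List.pySetD L j (PySem.List.pyGetD r j 0)) L =
    r.take c ++ L.drop c := by
  have h := fill_row r c hc 0 L (Nat.zero_le c) hL
  simpa using h


lemma sep (r : List Int) (js : List Int) :
    ∀ (R : List (List Int)) (p q : Nat), p ≠ q → ∀ (hp : p < R.length) (hq : q < R.length),
    js.foldl (fun R j =>
      (R.set p (PySem.List.pySetD (R.getD p []) j (PySem.List.pyGetD r j 0))).set q
        (PySem.List.pySetD
          ((R.set p (PySem.List.pySetD (R.getD p []) j (PySem.List.pyGetD r j 0))).getD q []) j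
          (PySem.List.pyGetD r j 0))) R =
    (R.set p (js.foldl (fun L j => PySem.List.pySetD L j (PySem.List.pyGetD r j 0)) (R[p]'hp))).set q
      (js.foldl (fun L j => PySem.List.pySetD L j (PySem.List.pyGetD r j 0)) (R[q]'hq)) := by
  induction js with
  | nil =>
    intro R p q hne hp hq
    simp
  | cons j js ih =>
    intro R p q hne hp hq
    rw [List.foldl_cons, List.foldl_cons, List.foldl_cons]
    set A := PySem.List.pySetD R[p] j (PySem.List.pyGetD r j 0) with hA
    set B := PySem.List.pySetD R[q] j (PySem.List.pyGetD r j 0) with hB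
    have hq1 : q < (R.set p A).length := by simpa using hq
    rw [List.getD_eq_getElem R [] hp, List.getD_eq_getElem _ [] hq1, List.getElem_set_ne hne hq1]
    rw [ih ((R.set p A).set q B) p q hne (by simpa using hp) (by simpa using hq)]
    have hgp : ((R.set p A).set q B)[p]'(by simpa using hp) = A := by
      rw [List.getElem_set_ne (Ne.symm hne), List.getElem_set_self]
    have hgq : ((R.set p A).set q B)[q]'(by simpa using hq) = B := by
      rw [List.getElem_set_self]
    rw [hgp, hgq]
    rw [List.set_comm _ _ hne, List.set_set, List.set_comm _ _ (Ne.symm hne), List.set_set]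


lemma init_zero (n c : Nat) :
    (PySem.List.pyRange 0 (2*(n:Int)) 1).foldl (fun R _ =>
      R ++ [(PySem.List.pyRange 0 (c:Int) 1).foldl (fun L _ => L ++ [(0:Int)]) []]) [] =
    List.replicate (2*n) (List.replicate c (0:Int)) := by
  have hinner : (PySem.List.pyRange 0 (c:Int) 1).foldl (fun L _ => L ++ [(0:Int)]) [] =
      List.replicate c (0:Int) := by
    rw [PySem.List.pyRange_zero_nat]
    rw [PySem.List.foldl_append_singleton_eq_map (fun _ => (0:Int))]
    simp [Function.comp_def, List.map_const']
  rw [hinner]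
  rw [show (2*(n:Int)) = (((2*n : Nat)) : Int) by push_cast; ring]
  rw [PySem.List.pyRange_zero_nat]
  rw [PySem.List.foldl_append_singleton_eq_map (fun _ => List.replicate c (0:Int))]
  simp [Function.comp_def, List.map_const']

lemma outer_inv (M : List (List Int)) (c : Nat) (hc : ∀ row ∈ M, c ≤ row.length) :
    ∀ (d a : Nat), a + d = M.length → ∀ (P S : List (List Int)), P.length = a → S.length = a →
    (PySem.List.pyRange (a:Int) (M.length:Int) 1).foldl
      (fun R i => (PySem.List.pyRange 0 (c:Int) 1).foldl (fun R j =>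
        let R1 := PySem.List.pySetD R i
          (PySem.List.pySetD (PySem.List.pyGetD R i []) j
            (PySem.List.pyGetD (PySem.List.pyGetD M i []) j 0))
        PySem.List.pySetD R1 (2*(M.length:Int) - i - 1)
          (PySem.List.pySetD (PySem.List.pyGetD R1 (2*(M.length:Int) - i - 1) []) j
            (PySem.List.pyGetD (PySem.List.pyGetD M i []) j 0))) R)
      (P ++ List.replicate (2*d) (List.replicate c (0:Int)) ++ S)
    = P ++ (M.drop a).map (fun r => r.take c) ++ ((M.drop a).map (fun r => r.take c)).reverse ++ S := by
  intro d
  induction d with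
  | zero =>
    intro a ha P S hP hS
    rw [PySem.List.pyRange_one_eq_nil (show ((M.length:Nat):Int) ≤ ((a:Nat):Int) by omega)]
    simp [show a = M.length by omega]
  | succ d ih =>
    intro a ha P S hP hS
    have han : a < M.length := by omega
    set n := M.length with hn
    rw [PySem.List.pyRange_one_cons (show ((a:Nat):Int) < ((n:Nat):Int) by exact_mod_cast han)]
    rw [List.foldl_cons]
    set q : Nat := 2*n - a - 1 with hqdef
    have hcast : (2*(n:Int) - (a:Int) - 1) = (q:Int) := by omega
    rw [hcast]
    have hMa : PySem.List.pyGetD M (a:Int) [] = M[a]'han := by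
      rw [PySem.List.pyGetD_natCast, List.getD_eq_getElem M [] han]
    rw [hMa]
    simp only [PySem.List.pySetD_natCast, PySem.List.pyGetD_natCast]
    set Z := P ++ List.replicate (2*(d+1)) (List.replicate c (0:Int)) ++ S with hZ
    have hZlen : Z.length = 2*n := by
      simp only [hZ, List.length_append, List.length_replicate]; omega
    have hpq : a ≠ q := by omega
    have hp : a < Z.length := by omega
    have hq : q < Z.length := by omega
    rw [sep (M[a]'han) _ Z a q hpq hp hq]
    have hZp : Z[a]'hp = List.replicate c (0:Int) := by
      simp only [hZ]
      rw [List.getElem_append_left (by simp only [List.length_append, List.length_replicate]; omega)]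
      rw [List.getElem_append_right (by omega)]
      simp [hP]
    have hZq : Z[q]'hq = List.replicate c (0:Int) := by
      simp only [hZ]
      rw [List.getElem_append_left (by simp only [List.length_append, List.length_replicate]; omega)]
      rw [List.getElem_append_right (by omega)]
      simp [hP]
    have hrc : c ≤ (M[a]'han).length := hc _ (List.getElem_mem han)
    rw [hZp, hZq, fill_zero _ c hrc _ (by simp), List.drop_replicate]
    simp only [show c - c = 0 by omega, List.replicate_zero, List.append_nil]
    set v := (M[a]'han).take c with hv
    have hrep1 : List.replicate (2*(d+1)) (List.replicate c (0:Int)) =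
        List.replicate c (0:Int) :: List.replicate (2*d+1) (List.replicate c (0:Int)) := by
      rw [show 2*(d+1) = (2*d+1)+1 by ring, List.replicate_succ]
    have h1 : Z.set a v = (P ++ (v :: List.replicate (2*d+1) (List.replicate c (0:Int)))) ++ S := by
      simp only [hZ, hrep1]
      rw [List.set_append_left _ _ (by simp only [List.length_append, List.length_cons, List.length_replicate]; omega)]
      rw [List.set_append_right _ _ (by omega)]
      rw [hP, Nat.sub_self, List.set_cons_zero]
    have h2 : ((P ++ (v :: List.replicate (2*d+1) (List.replicate c (0:Int)))) ++ S).set q v =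
        (P ++ (v :: (List.replicate (2*d) (List.replicate c (0:Int)) ++ [v]))) ++ S := by
      rw [List.set_append_left _ _ (by simp only [List.length_append, List.length_cons, List.length_replicate]; omega)]
      rw [List.set_append_right _ _ (by omega)]
      rw [hP, show q - a = 2*d+1 by omega, List.set_cons_succ]
      rw [show List.replicate (2*d+1) (List.replicate c (0:Int)) = List.replicate (2*d) (List.replicate c (0:Int)) ++ [List.replicate c (0:Int)] from List.replicate_succ']
      rw [List.set_append_right _ _ (by simp)]
      simp
    rw [h1, h2]
    have hstate : (P ++ (v :: (List.replicate (2*d) (List.replicate c (0:Int)) ++ [v]))) ++ S =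
        (P ++ [v]) ++ List.replicate (2*d) (List.replicate c (0:Int)) ++ ([v] ++ S) := by
      simp
    rw [hstate]
    have hih := ih (a+1) (by omega) (P ++ [v]) ([v] ++ S)
      (by simp [hP]) (by simp [hS])
    rw [show ((a:Int) + 1) = (((a+1:Nat)):Int) by push_cast; ring, hih]
    have hdropm : List.drop a (M.map (fun r => r.take c)) =
        v :: List.drop (a+1) (M.map (fun r => r.take c)) := by
      rw [List.drop_eq_getElem_cons (by simpa using han)]
      simp [hv]
    simp only [List.map_drop] at hdropm ⊢
    rw [hdropm]
    simp [List.append_assoc]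

theorem build_symetric_spec : Claim_equal_build_symetric := by
  intro M hdom hpre
  obtain ⟨hne, hrows⟩ := hpre
  unfold Spec_build_symetric
  cases M with
  | nil => exact absurd rfl hne
  | cons m0 Ms =>
    set M := m0 :: Ms with hM
    have hhead : PySem.List.pyGetD M 0 [] = m0 := by
      rw [PySem.List.pyGetD_zero]; rfl
    have hc : ∀ row ∈ M, m0.length ≤ row.length := by
      intro row hr
      simpa using hrows row hr
    -- evaluate B
    have hmap : M.map (fun row => PySem.List.slice row none (some ((m0.length:Nat):Int))) =
        M.map (fun r => r.take m0.length) :=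
      List.map_congr_left (fun r _ => PySem.List.slice_to_natCast r m0.length)
    have hB : build_symetric_alt M =
        M.map (fun r => r.take m0.length) ++ (M.map (fun r => r.take m0.length)).reverse := by
      simp only [build_symetric_alt, hhead]
      rw [List.map_reverse, hmap]
    rw [hB]
    -- evaluate A
    show build_symetric M = _
    simp only [build_symetric, hhead]
    rw [init_zero M.length m0.length]
    have H := outer_inv M m0.length hc M.length 0 (by omega) [] [] rfl rfl
    simp only [Nat.cast_zero, List.nil_append, List.append_nil, List.drop_zero] at H
    exact H
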